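-- pv_equiv track=rewrite | github.com/bssrdf/pyleet | CountNodesWiththeHighestScore.py | countHighestScoreNodes2
-- ===== SOURCE A (Python) =====
-- from typing import List
-- from collections import defaultdict
--
-- def countHighestScoreNodes2(parents: List[int]) -> int:
--     n = len(parents)
--     tree = defaultdict(list)
--     scores = defaultdict(int)
--     max_score = [0]
--     for i,p in enumerate(parents[1:], start=1):
--         tree[p].append(i)
--     def dfs(root):
--         if len(tree[root]) == 0:
--             scores[n-1] += 1
--             max_score[0] = max(max_score[0], n-1)
--             return 1
--         score, subs = 1, 0
--         for i, child in enumerate(tree[root]):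
--             c = dfs(child)
--             subs += c
--             if c > 0: score *= c
--         c = n-subs-1
--         if c > 0: score *= c
--         scores[score] += 1
--         max_score[0] = max(max_score[0], score)
--         return subs + 1
--     dfs(0)
--     return scores[max_score[0]]
-- ===== SOURCE B (Python) =====
-- from typing import List
-- from collections import defaultdict
--
-- def countHighestScoreNodes2(parents: List[int]) -> int:
--     n = len(parents)
--     children = defaultdict(list)
--     for i in range(1, n):
--         children[parents[i]].append(i)
--     # iterative DFS from the root: visit order has every parent before its children
--     order = []
--     stack = [0] if n else []
--     while stack:
--         v = stack.pop()
--         order.append(v)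
--         stack.extend(children[v])
--     # subtree sizes, computed leaves-first over the reversed order
--     size = defaultdict(int)
--     for v in reversed(order):
--         size[v] = 1 + sum(size[c] for c in children[v])
--     # one flat pass: score of each visited node, tracking the maximum and its multiplicity
--     best, cnt = 0, 0
--     for v in order:
--         s = 1
--         for c in children[v]:
--             s *= size[c]
--         up = n - size[v]
--         if up > 0:
--             s *= up
--         if s > best:
--             best, cnt = s, 1
--         elif s == best:
--             cnt += 1
--     return cnt
-- ===== Notes on version B (the rewrite author's own statement) =====
-- stated objective: alternative
-- what changed: A's recursive dfs that threads score/count dicts and a max cell through the recursion is replaced by an iterative decomposition: an explicit-stack DFS produces the visit order, a leaves-first pass over the reversed order computes subtree sizes, and one flat pass computes each node's score while tracking the running maximum and its multiplicity directly (no score-counter dict).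
import Mathlib
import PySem

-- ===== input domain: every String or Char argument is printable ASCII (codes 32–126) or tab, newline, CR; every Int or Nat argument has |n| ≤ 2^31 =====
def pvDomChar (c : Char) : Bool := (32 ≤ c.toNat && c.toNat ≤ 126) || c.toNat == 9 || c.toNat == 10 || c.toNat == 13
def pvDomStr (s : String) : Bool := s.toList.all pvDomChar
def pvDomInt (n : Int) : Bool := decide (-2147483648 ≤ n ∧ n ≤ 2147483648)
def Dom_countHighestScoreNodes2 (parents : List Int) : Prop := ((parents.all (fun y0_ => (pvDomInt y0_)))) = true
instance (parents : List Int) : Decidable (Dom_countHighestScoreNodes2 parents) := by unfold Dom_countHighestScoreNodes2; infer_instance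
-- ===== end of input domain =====

-- B replaces A's recursive dfs (which threads score/count dicts through the recursion) by an
-- iterative decomposition: an explicit-stack DFS producing the visit order, a leaves-first size
-- pass over that order, and one flat scoring pass tracking the running maximum and its
-- multiplicity (objective: alternative/simpler decomposition, no speed claim).

-- ===== PORT A =====
def pvTreeA (parents : List Int) : PySem.Dict Int (List Int) :=
  (PySem.List.enumerate (parents.drop 1) 1).foldl
    (fun d ip => d.modify ip.2 [] (· ++ [ip.1])) PySem.Dict.empty

def pvDfsA (n : Int) (tree : PySem.Dict Int (List Int)) :
    Nat → Int → PySem.Dict Int Int × Int → PySem.Dict Int Int × Int × Int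
  | 0, _, sm => (sm.1, sm.2, 0)   -- fuel guard only; the recursion never exhausts it
  | fuel+1, root, sm =>
    let ch := tree.getD root []
    if ch.length = 0 then
      (sm.1.modify (n-1) 0 (· + 1), max sm.2 (n-1), 1)
    else
      let st := ch.foldl
        (fun (st : Int × Int × PySem.Dict Int Int × Int) child =>
          let r := pvDfsA n tree fuel child (st.2.2.1, st.2.2.2)
          (if r.2.2 > 0 then st.1 * r.2.2 else st.1, st.2.1 + r.2.2, r.1, r.2.1))
        (1, 0, sm.1, sm.2)
      let c := n - st.2.1 - 1
      let score := if c > 0 then st.1 * c else st.1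
      (st.2.2.1.modify score 0 (· + 1), max st.2.2.2 score, st.2.1 + 1)

def countHighestScoreNodes2 (parents : List Int) : Int :=
  let n : Int := parents.length
  let tree := pvTreeA parents
  let r := pvDfsA n tree (parents.length + 1) 0 (PySem.Dict.empty, 0)
  r.1.getD r.2.1 0

-- ===== PORT B =====
def pvChildrenB (parents : List Int) : PySem.Dict Int (List Int) :=
  (PySem.List.pyRange 1 (parents.length : Int) 1).foldl
    (fun d i => d.modify (PySem.List.pyGetD parents i 0) [] (· ++ [i])) PySem.Dict.empty

def pvStackB (children : PySem.Dict Int (List Int)) :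
    Nat → List Int → List Int → List Int
  | 0, _, order => order   -- fuel guard only; the loop empties the stack first
  | fuel+1, stack, order =>
    match PySem.List.pop? stack (-1) with
    | none => order
    | some vr => pvStackB children fuel (vr.2 ++ children.getD vr.1 []) (order ++ [vr.1])

def countHighestScoreNodes2_alt (parents : List Int) : Int :=
  let n : Int := parents.length
  let children := pvChildrenB parents
  let order := pvStackB children (parents.length + 1) (if (0:Int) < n then [0] else []) []
  let size := order.reverse.foldl
    (fun d v => d.insert v (1 + (children.getD v []).foldl (fun s c => s + d.getD c 0) 0))
    (PySem.Dict.empty : PySem.Dict Int Int)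
  let bc := order.foldl
    (fun (bc : Int × Int) v =>
      let s0 := (children.getD v []).foldl (fun s c => s * size.getD c 0) 1
      let up := n - size.getD v 0
      let s := if up > 0 then s0 * up else s0
      if s > bc.1 then (s, 1) else if s = bc.1 then (bc.1, bc.2 + 1) else bc)
    (0, 0)
  bc.2

-- ===== PRECONDITION & SPEC =====
def Spec_countHighestScoreNodes2 (parents : List Int) (out : Int) : Prop := out = countHighestScoreNodes2_alt parents
instance (parents : List Int) (out : Int) : Decidable (Spec_countHighestScoreNodes2 parents out) := by unfold Spec_countHighestScoreNodes2; infer_instance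

-- ===== CLAIM (what is proved, stated in full; the proofs are below) =====
def Claim_equal_countHighestScoreNodes2 : Prop := ∀ (parents : List Int), Dom_countHighestScoreNodes2 parents → Spec_countHighestScoreNodes2 parents (countHighestScoreNodes2 parents)

-- ===== LEMMAS AND PROOFS =====

-- The children adjacency, read functionally out of A's dict.
def pvCf (parents : List Int) (v : Int) : List Int := (pvTreeA parents).getD v []

-- Fueled preorder subtree list (children in list order) and its reversed-children variant
-- (the order B's explicit stack produces).
def pvSub (parents : List Int) : Nat → Int → List Int
  | 0, _ => []
  | f+1, v => v :: (pvCf parents v).flatMap (pvSub parents f)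

def pvSubR (parents : List Int) : Nat → Int → List Int
  | 0, _ => []
  | f+1, v => v :: (pvCf parents v).reverse.flatMap (pvSubR parents f)

-- A root-anchored downward path: [v_k, …, v_1, 0] with each node a child of the next.
inductive PvChain (parents : List Int) : List Int → Prop
  | root : PvChain parents [0]
  | step {c v : Int} {rest : List Int} :
      PvChain parents (v :: rest) → c ∈ pvCf parents v → PvChain parents (c :: v :: rest)

def pvSzT (parents : List Int) (v : Int) : Int :=
  ((pvSub parents (parents.length + 1) v).length : Int)

def pvScoreT (parents : List Int) (v : Int) : Int :=
  if pvCf parents v = [] then (parents.length : Int) - 1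
  else
    let sizes := (pvCf parents v).map (pvSzT parents)
    let s := sizes.foldl (fun a b => if b > 0 then a * b else a) 1
    let c := (parents.length : Int) - sizes.sum - 1
    if c > 0 then s * c else s

def pvScoreF (parents : List Int) (f : Nat) (v : Int) : Int :=
  if pvCf parents v = [] then (parents.length : Int) - 1
  else
    let sizes := (pvCf parents v).map (fun c => ((pvSub parents f c).length : Int))
    let s := sizes.foldl (fun a b => if b > 0 then a * b else a) 1
    let c := (parents.length : Int) - sizes.sum - 1
    if c > 0 then s * c else s

-- The list of scores A's dfs records, in recording (post-)order.
def pvSL (parents : List Int) : Nat → Int → List Int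
  | 0, _ => []
  | f+1, v =>
    if pvCf parents v = [] then [(parents.length : Int) - 1]
    else (pvCf parents v).flatMap (pvSL parents f) ++ [pvScoreF parents f v]

theorem pvFlatMap_congr {α β : Type} {l : List α} {f g : α → List β}
    (h : ∀ x ∈ l, f x = g x) : l.flatMap f = l.flatMap g := by
  induction l with
  | nil => rfl
  | cons x xs ih =>
    simp only [List.flatMap_cons, h x (by simp), ih (fun y hy => h y (by simp [hy]))]

theorem pvSum_natCast (l : List Int) (g : Int → Nat) :
    (l.map (fun x => ((g x : Nat) : Int))).sum = (((l.map g).sum : Nat) : Int) := by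
  induction l with
  | nil => rfl
  | cons x xs ih => simp [ih]

theorem pvEmpty_getD {ν : Type} (v : Int) (d0 : ν) :
    (PySem.Dict.empty : PySem.Dict Int ν).getD v d0 = d0 := by
  simp [PySem.Dict.empty, PySem.Dict.getD, PySem.Dict.get?]

theorem pvCf_eq (parents : List Int) (v : Int) :
    pvCf parents v =
      ((PySem.List.enumerate (parents.drop 1) 1).filter (fun p => p.2 == v)).map (·.1) := by
  unfold pvCf pvTreeA
  have h : (PySem.List.enumerate (parents.drop 1) 1).foldl
      (fun d ip => d.modify ip.2 [] (· ++ [ip.1])) PySem.Dict.empty =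
      ((PySem.List.enumerate (parents.drop 1) 1).map Prod.swap).foldl
      (fun d p => d.modify p.1 [] (· ++ [p.2])) PySem.Dict.empty := by
    rw [List.foldl_map]; rfl
  rw [h, PySem.Dict.getD_foldl_modify_append, pvEmpty_getD]
  simp [List.filter_map, List.map_map, Function.comp_def, Prod.swap]

theorem pvCf_mem {parents : List Int} {v c : Int} (h : c ∈ pvCf parents v) :
    1 ≤ c ∧ c < (parents.length : Int) ∧ PySem.List.pyGetD parents c 0 = v := by
  rw [pvCf_eq] at h
  simp only [List.mem_map, List.mem_filter] at h
  obtain ⟨p, ⟨hp, hpv⟩, rfl⟩ := h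
  rw [PySem.List.mem_enumerate_iff] at hp
  obtain ⟨k, hk, rfl⟩ := hp
  simp only [beq_iff_eq] at hpv
  have hlen : (List.drop 1 parents).length = parents.length - 1 := by simp
  have hkl : 1 + k < parents.length := by omega
  have hcast : (1 : Int) + (k : Int) = ((1 + k : Nat) : Int) := by push_cast; ring
  refine ⟨by omega, by push_cast; omega, ?_⟩
  rw [hcast, PySem.List.pyGetD_natCast, List.getD_eq_getElem _ _ hkl]
  rw [← hpv]
  simp [Nat.add_comm]

theorem pvCf_nodup (parents : List Int) (v : Int) : (pvCf parents v).Nodup := by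
  rw [pvCf_eq]
  have h := (PySem.List.pairwise_lt_enumerate (parents.drop 1) 1).filter (fun p => p.2 == v)
  show List.Pairwise _ _
  rw [List.pairwise_map]
  exact h.imp (fun hlt => ne_of_lt hlt)

theorem pvEnum_gen : ∀ (xs : List Int) (s : Int) (full : List Int),
    (∀ (k : Nat), k < xs.length → PySem.List.pyGetD full (s + k) 0 = xs.getD k 0) →
    PySem.List.enumerate xs s =
      (PySem.List.pyRange s (s + xs.length) 1).map (fun i => (i, PySem.List.pyGetD full i 0)) := by
  intro xs
  induction xs with
  | nil =>
    intro s full _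
    simp [PySem.List.enumerate]
  | cons x xs ih =>
    intro s full h
    have hlt : s < s + ((xs.length : Int) + 1) := by omega
    have hlen : ((x :: xs).length : Int) = (xs.length : Int) + 1 := by
      push_cast [List.length_cons]; ring
    rw [PySem.List.enumerate_cons, hlen, PySem.List.pyRange_one_cons hlt, List.map_cons]
    have h0 := h 0 (by simp)
    simp only [Nat.cast_zero, add_zero, List.getD_cons_zero] at h0
    rw [h0]
    congr 1
    rw [show s + ((xs.length : Int) + 1) = (s + 1) + (xs.length : Int) by ring]
    exact ih (s + 1) full (fun k hk => by
      have hkk := h (k + 1) (by simp; omega)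
      rw [show s + (((k : Nat) + 1 : Nat) : Int) = s + 1 + (k : Nat) by push_cast; ring] at hkk
      simpa using hkk)

theorem pvEnum_eq (parents : List Int) :
    PySem.List.enumerate (parents.drop 1) 1 =
      (PySem.List.pyRange 1 (parents.length : Int) 1).map
        (fun i => (i, PySem.List.pyGetD parents i 0)) := by
  cases parents with
  | nil =>
    have h0 : PySem.List.pyRange 1 (0:Int) 1 = [] := by simp [PySem.List.pyRange]
    simp [h0]
  | cons p rest =>
    have key := pvEnum_gen rest 1 (p :: rest) (fun k hk => by
      have hcast : (1 : Int) + (k : Int) = ((1 + k : Nat) : Int) := by push_cast; ring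
      have hkl : 1 + k < (p :: rest).length := by simp; omega
      rw [hcast, PySem.List.pyGetD_natCast]
      rw [List.getD_eq_getElem _ _ hkl, List.getD_eq_getElem _ _ hk]
      simp [Nat.add_comm])
    have hb : (1 : Int) + (rest.length : Int) = (((p :: rest).length : Nat) : Int) := by
      push_cast [List.length_cons]; ring
    rw [hb] at key
    simpa using key

theorem pvChildrenB_eq (parents : List Int) : pvChildrenB parents = pvTreeA parents := by
  unfold pvChildrenB pvTreeA
  rw [pvEnum_eq, List.foldl_map]

theorem pvChain_inv {parents : List Int} {l : List Int} (h : PvChain parents l) :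
    ∀ {c : Int} {rest : List Int}, l = c :: rest → rest ≠ [] → PvChain parents rest := by
  cases h with
  | root =>
    intro c rest he hne
    cases he
    simp at hne
  | step hch hc =>
    intro c' rest' he hne
    cases he
    exact hch

theorem pvChain_suffix {parents : List Int} :
    ∀ {a b : List Int}, PvChain parents (a ++ b) → b ≠ [] → PvChain parents b := by
  intro a
  induction a with
  | nil => intro b h _; simpa using h
  | cons x a ih =>
    intro b h hb
    have hne : a ++ b ≠ [] := by
      intro hn
      exact hb (List.append_eq_nil_iff.mp hn).2
    exact ih (pvChain_inv h rfl hne) hb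

theorem pvChain_unique {parents : List Int} :
    ∀ {l l' : List Int}, PvChain parents l → PvChain parents l' →
      l.head? = l'.head? → l = l' := by
  intro l l' h1
  induction h1 generalizing l' with
  | root =>
    intro h2 hh
    cases h2 with
    | root => rfl
    | @step c v rest hch hc =>
      simp only [List.head?_cons, Option.some.injEq] at hh
      have := (pvCf_mem hc).1
      omega
  | @step c v rest hch hc ih =>
    intro h2 hh
    cases h2 with
    | root =>
      simp only [List.head?_cons, Option.some.injEq] at hh
      have := (pvCf_mem hc).1
      omega
    | @step c' v' rest' hch' hc' =>
      simp only [List.head?_cons, Option.some.injEq] at hh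
      subst hh
      have hv : v = v' := by
        have h1 := (pvCf_mem hc).2.2
        have h2 := (pvCf_mem hc').2.2
        rw [← h1, ← h2]
      subst hv
      have := ih hch' (by simp)
      simp [this]

theorem pvChain_nodup {parents : List Int} {l : List Int} (h : PvChain parents l) :
    l.Nodup := by
  induction h with
  | root => simp
  | @step c v rest hch hc ih =>
    refine List.Nodup.cons ?_ ih
    intro hmem
    obtain ⟨pre, suf, hsplit⟩ := List.append_of_mem hmem
    have hsuf : PvChain parents (c :: suf) := by
      refine pvChain_suffix (a := pre) ?_ (by simp)
      rw [← hsplit]; exact hch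
    have heq := pvChain_unique (PvChain.step hch hc) hsuf (by simp)
    have hlen := congrArg List.length heq
    have hlen2 := congrArg List.length hsplit
    simp at hlen hlen2
    omega

theorem pvChain_mem {parents : List Int} {l : List Int} (h : PvChain parents l) :
    ∀ x ∈ l, x = 0 ∨ (1 ≤ x ∧ x < (parents.length : Int)) := by
  induction h with
  | root => simp
  | @step c v rest hch hc ih =>
    intro x hx
    rcases List.mem_cons.mp hx with rfl | hx
    · exact Or.inr ⟨(pvCf_mem hc).1, (pvCf_mem hc).2.1⟩
    · exact ih x hx

theorem pvNodup_length_le {l : List Int} {s : Finset Int} (h : l.Nodup)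
    (h2 : ∀ x ∈ l, x ∈ s) : l.length ≤ s.card := by
  classical
  calc l.length = l.toFinset.card := (List.toFinset_card_of_nodup h).symm
  _ ≤ s.card := Finset.card_le_card (fun x hx => h2 x (List.mem_toFinset.mp hx))

theorem pvChain_length {parents : List Int} {l : List Int} (h : PvChain parents l) :
    l.length ≤ parents.length + 1 := by
  have hb := pvNodup_length_le (pvChain_nodup h)
      (s := insert 0 (Finset.Ico 1 (parents.length : Int))) (fun x hx => by
    rcases pvChain_mem h x hx with rfl | ⟨h1, h2⟩
    · simp
    · simp [Finset.mem_Ico]; omega)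
  have hc : (insert 0 (Finset.Ico 1 (parents.length : Int))).card ≤
      (Finset.Ico 1 (parents.length : Int)).card + 1 := Finset.card_insert_le _ _
  have hI : (Finset.Ico 1 (parents.length : Int)).card = ((parents.length : Int) - 1).toNat := by
    simp [Int.card_Ico]
  omega

theorem pvSub_stable {parents : List Int} :
    ∀ (f1 : Nat) {v : Int} {l : List Int} (f2 : Nat), PvChain parents (v :: l) →
      parents.length + 1 ≤ f1 + l.length → parents.length + 1 ≤ f2 + l.length →
      pvSub parents f1 v = pvSub parents f2 v := by
  intro f1
  induction f1 with
  | zero =>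
    intro v l f2 h h1 h2
    have := pvChain_length h
    simp at this
    omega
  | succ f1 ih =>
    intro v l f2 h h1 h2
    cases f2 with
    | zero =>
      have := pvChain_length h
      simp at this
      omega
    | succ g =>
      simp only [pvSub]
      congr 1
      apply pvFlatMap_congr
      intro c hc
      exact ih g (PvChain.step h hc) (by simp; omega) (by simp; omega)

theorem pvSubR_stable {parents : List Int} :
    ∀ (f1 : Nat) {v : Int} {l : List Int} (f2 : Nat), PvChain parents (v :: l) →
      parents.length + 1 ≤ f1 + l.length → parents.length + 1 ≤ f2 + l.length →
      pvSubR parents f1 v = pvSubR parents f2 v := by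
  intro f1
  induction f1 with
  | zero =>
    intro v l f2 h h1 h2
    have := pvChain_length h
    simp at this
    omega
  | succ f1 ih =>
    intro v l f2 h h1 h2
    cases f2 with
    | zero =>
      have := pvChain_length h
      simp at this
      omega
    | succ g =>
      simp only [pvSubR]
      congr 1
      apply pvFlatMap_congr
      intro c hc
      exact ih g (PvChain.step h (List.mem_reverse.mp hc)) (by simp; omega) (by simp; omega)

theorem pvSub_unfold {parents : List Int} {v : Int} {l : List Int}
    (h : PvChain parents (v :: l)) :
    pvSub parents (parents.length + 1) v =
      v :: (pvCf parents v).flatMap (pvSub parents (parents.length + 1)) := by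
  conv_lhs => simp only [pvSub]
  congr 1
  apply pvFlatMap_congr
  intro c hc
  exact pvSub_stable parents.length (parents.length + 1) (PvChain.step h hc)
    (by simp) (by simp)

theorem pvSubR_unfold {parents : List Int} {v : Int} {l : List Int}
    (h : PvChain parents (v :: l)) :
    pvSubR parents (parents.length + 1) v =
      v :: (pvCf parents v).reverse.flatMap (pvSubR parents (parents.length + 1)) := by
  conv_lhs => simp only [pvSubR]
  congr 1
  apply pvFlatMap_congr
  intro c hc
  exact pvSubR_stable parents.length (parents.length + 1)
    (PvChain.step h (List.mem_reverse.mp hc)) (by simp) (by simp)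

theorem pvSub_chain {parents : List Int} :
    ∀ (f : Nat) {v : Int} {l : List Int} {x : Int}, PvChain parents (v :: l) →
      x ∈ pvSub parents f v →
      ∃ q, PvChain parents (q ++ v :: l) ∧ (q ++ v :: l).head? = some x := by
  intro f
  induction f with
  | zero => intro v l x _ hx; simp [pvSub] at hx
  | succ f ih =>
    intro v l x h hx
    simp only [pvSub, List.mem_cons, List.mem_flatMap] at hx
    rcases hx with rfl | ⟨c, hc, hxc⟩
    · exact ⟨[], h, by simp⟩
    · obtain ⟨q, hq, hh⟩ := ih (PvChain.step h hc) hxc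
      refine ⟨q ++ [c], ?_, ?_⟩
      · simpa [List.append_assoc] using hq
      · simpa [List.append_assoc] using hh

theorem pvSub_nodup {parents : List Int} :
    ∀ (f : Nat) {v : Int} {l : List Int}, PvChain parents (v :: l) →
      (pvSub parents f v).Nodup := by
  intro f
  induction f with
  | zero => intro v l _; simp [pvSub]
  | succ f ih =>
    intro v l h
    simp only [pvSub]
    refine List.Nodup.cons ?_ (List.nodup_flatMap.mpr ⟨fun c hc => ih (PvChain.step h hc), ?_⟩)
    · intro hmem
      rw [List.mem_flatMap] at hmem
      obtain ⟨c, hc, hvc⟩ := hmem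
      obtain ⟨q, hq, hh⟩ := pvSub_chain f (PvChain.step h hc) hvc
      have := pvChain_unique hq h (by simpa using hh)
      have hlen := congrArg List.length this
      simp at hlen
      omega
    · refine (pvCf_nodup parents v).imp_of_mem ?_
      intro c c' hc hc' hne x hx hx'
      obtain ⟨q, hq, hh⟩ := pvSub_chain f (PvChain.step h hc) hx
      obtain ⟨q', hq', hh'⟩ := pvSub_chain f (PvChain.step h hc') hx'
      have heq := pvChain_unique hq hq' (hh.trans hh'.symm)
      have heq2 : (q ++ [c]) ++ (v :: l) = (q' ++ [c']) ++ (v :: l) := by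
        simpa [List.append_assoc] using heq
      have hqq := List.append_cancel_right heq2
      have hcc : c = c' := by
        have h1 : (q ++ [c]).getLast? = (q' ++ [c']).getLast? := by rw [hqq]
        simpa [List.getLast?_concat] using h1
      exact hne hcc

theorem pvSub_mem_bound {parents : List Int} {f : Nat} {v : Int} {l : List Int} {x : Int}
    (h : PvChain parents (v :: l)) (hx : x ∈ pvSub parents f v) :
    x = 0 ∨ (1 ≤ x ∧ x < (parents.length : Int)) := by
  obtain ⟨q, hq, hh⟩ := pvSub_chain f h hx
  exact pvChain_mem hq x (List.mem_of_mem_head? (by simp [hh]))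

theorem pvSub_length_le {parents : List Int} {v : Int} {l : List Int}
    (h : PvChain parents (v :: l)) (hn : 1 ≤ parents.length) (f : Nat) :
    (pvSub parents f v).length ≤ parents.length := by
  have hb := pvNodup_length_le (pvSub_nodup f h)
      (s := insert 0 (Finset.Ico 1 (parents.length : Int))) (fun x hx => by
    rcases pvSub_mem_bound h hx with rfl | ⟨h1, h2⟩
    · simp
    · simp [Finset.mem_Ico]; omega)
  have hc : (insert 0 (Finset.Ico 1 (parents.length : Int))).card ≤
      (Finset.Ico 1 (parents.length : Int)).card + 1 := Finset.card_insert_le _ _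
  have hI : (Finset.Ico 1 (parents.length : Int)).card = ((parents.length : Int) - 1).toNat := by
    simp [Int.card_Ico]
  omega

theorem pvSub_closed {parents : List Int} :
    ∀ (f : Nat) {v : Int} {l : List Int} {x c : Int}, PvChain parents (v :: l) →
      parents.length + 1 ≤ f + l.length →
      x ∈ pvSub parents f v → c ∈ pvCf parents x → c ∈ pvSub parents f v := by
  intro f
  induction f with
  | zero =>
    intro v l x c h hf hx
    simp [pvSub] at hx
  | succ f ih =>
    intro v l x c h hf hx hc
    simp only [pvSub, List.mem_cons, List.mem_flatMap] at hx ⊢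
    rcases hx with rfl | ⟨c', hc', hxc'⟩
    · refine Or.inr ⟨c, hc, ?_⟩
      have hch := PvChain.step h hc
      have := pvChain_length hch
      simp at this
      cases f with
      | zero => omega
      | succ g => simp [pvSub]
    · exact Or.inr ⟨c', hc', ih (PvChain.step h hc') (by simp; omega) hxc' hc⟩

theorem pvSub_perm (parents : List Int) :
    ∀ (f : Nat) (v : Int), (pvSubR parents f v).Perm (pvSub parents f v) := by
  intro f
  induction f with
  | zero => intro v; simp [pvSub, pvSubR]
  | succ f ih =>
    intro v
    simp only [pvSub, pvSubR]
    refine List.Perm.cons v ?_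
    refine ((List.Perm.refl _).flatMap (fun a _ => ih a)).trans ?_
    exact ((pvCf parents v).reverse_perm).flatMap (fun a _ => List.Perm.refl _)

theorem pvSzT_pos (parents : List Int) (v : Int) : 1 ≤ pvSzT parents v := by
  unfold pvSzT
  simp only [pvSub, List.length_cons]
  push_cast
  omega

theorem pvSzT_unfold {parents : List Int} {v : Int} {l : List Int}
    (h : PvChain parents (v :: l)) :
    pvSzT parents v = 1 + ((pvCf parents v).map (pvSzT parents)).sum := by
  unfold pvSzT
  rw [show (pvCf parents v).map (fun c => ((pvSub parents (parents.length + 1) c).length : Int)) =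
      (pvCf parents v).map (fun c => (((pvSub parents (parents.length + 1) c).length : Nat) : Int))
      from rfl, pvSum_natCast]
  rw [pvSub_unfold h]
  simp [List.length_flatMap]
  ring

theorem pvDfsA_eq {parents : List Int} :
    ∀ (f : Nat) {v : Int} {l : List Int} (d : PySem.Dict Int Int) (m : Int),
      PvChain parents (v :: l) → parents.length + 1 ≤ f + l.length →
      pvDfsA (parents.length : Int) (pvTreeA parents) f v (d, m) =
        ((pvSL parents f v).foldl (fun d s => d.modify s 0 (· + 1)) d,
         (pvSL parents f v).foldl max m,
         ((pvSub parents f v).length : Int)) := by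
  intro f
  induction f with
  | zero =>
    intro v l d m h hf
    have := pvChain_length h
    simp at this
    omega
  | succ f ih =>
    intro v l d m h hf
    by_cases hleaf : pvCf parents v = []
    · simp only [pvDfsA, pvSL, pvSub]
      rw [show (pvTreeA parents).getD v [] = pvCf parents v from rfl, hleaf]
      simp
    · have hlen0 : ¬ ((pvCf parents v).length = 0) := by
        simpa [List.length_eq_zero_iff] using hleaf
      simp only [pvDfsA]
      rw [show (pvTreeA parents).getD v [] = pvCf parents v from rfl]
      rw [if_neg hlen0]
      have loop : ∀ (cs : List Int), (∀ c ∈ cs, c ∈ pvCf parents v) →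
          ∀ (sc subs : Int) (d0 : PySem.Dict Int Int) (m0 : Int),
          cs.foldl (fun (st : Int × Int × PySem.Dict Int Int × Int) child =>
            let r := pvDfsA (parents.length : Int) (pvTreeA parents) f child (st.2.2.1, st.2.2.2)
            (if r.2.2 > 0 then st.1 * r.2.2 else st.1, st.2.1 + r.2.2, r.1, r.2.1))
            (sc, subs, d0, m0) =
          (cs.foldl (fun a c => if ((pvSub parents f c).length : Int) > 0
              then a * ((pvSub parents f c).length : Int) else a) sc,
           subs + (cs.map (fun c => ((pvSub parents f c).length : Int))).sum,
           (cs.flatMap (pvSL parents f)).foldl (fun d s => d.modify s 0 (· + 1)) d0,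
           (cs.flatMap (pvSL parents f)).foldl max m0) := by
        intro cs
        induction cs with
        | nil => intro _ sc subs d0 m0; simp
        | cons c cs ihc =>
          intro hmem sc subs d0 m0
          simp only [List.foldl_cons]
          rw [ih d0 m0 (PvChain.step h (hmem c (by simp))) (by simp; omega)]
          rw [ihc (fun c' hc' => hmem c' (by simp [hc']))]
          simp [List.foldl_append, add_assoc]
      rw [loop (pvCf parents v) (fun _ hc => hc)]
      simp only [pvSL, pvSub, if_neg hleaf, pvScoreF, List.foldl_append, List.foldl_map,
        List.length_cons, List.length_flatMap, zero_add]
      simp only [Prod.mk.injEq]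
      refine ⟨rfl, rfl, ?_⟩
      rw [show (pvCf parents v).map (fun c => ((pvSub parents f c).length : Int)) =
          (pvCf parents v).map (fun c => (((pvSub parents f c).length : Nat) : Int))
          from rfl, pvSum_natCast]
      push_cast
      ring

theorem pvSL_perm {parents : List Int} :
    ∀ (f : Nat) {v : Int} {l : List Int}, PvChain parents (v :: l) →
      parents.length + 1 ≤ f + l.length →
      (pvSL parents f v).Perm ((pvSub parents f v).map (pvScoreT parents)) := by
  intro f
  induction f with
  | zero =>
    intro v l h hf
    have := pvChain_length h
    simp at this
    omega
  | succ f ih =>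
    intro v l h hf
    by_cases hleaf : pvCf parents v = []
    · simp [pvSL, pvSub, hleaf, pvScoreT]
    · simp only [pvSL, pvSub, if_neg hleaf, List.map_cons]
      have hsc : pvScoreF parents f v = pvScoreT parents v := by
        unfold pvScoreF pvScoreT
        rw [if_neg hleaf, if_neg hleaf]
        have hsz : (pvCf parents v).map (fun c => ((pvSub parents f c).length : Int)) =
            (pvCf parents v).map (pvSzT parents) := by
          apply List.map_congr_left
          intro c hc
          unfold pvSzT
          rw [pvSub_stable f (parents.length + 1) (PvChain.step h hc) (by simp; omega) (by simp)]
        rw [hsz]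
      rw [hsc, List.map_flatMap]
      refine (List.perm_append_comm).trans ?_
      refine List.Perm.cons _ ?_
      exact (List.Perm.refl _).flatMap (fun c hc => ih (PvChain.step h hc) (by simp; omega))

theorem pvStackB_eq {parents : List Int} :
    ∀ (f : Nat) (stack acc : List Int),
      (∀ v ∈ stack, ∃ l, PvChain parents (v :: l)) →
      (stack.map (fun v => (pvSubR parents (parents.length + 1) v).length)).sum + 1 ≤ f →
      pvStackB (pvTreeA parents) f stack acc =
        acc ++ stack.reverse.flatMap (pvSubR parents (parents.length + 1)) := by
  intro f
  induction f with
  | zero => intro stack acc _ hfuel; omega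
  | succ f ihf =>
    intro stack acc hch hfuel
    rcases List.eq_nil_or_concat stack with rfl | ⟨st, v, rfl⟩
    · simp [pvStackB, PySem.List.pop?]
    · simp only [List.concat_eq_append] at *
      rw [show pvStackB (pvTreeA parents) (f+1) (st ++ [v]) acc =
          pvStackB (pvTreeA parents) f (st ++ (pvTreeA parents).getD v [])
            (acc ++ [v]) from by
        simp only [pvStackB, PySem.List.pop?_last]]
      obtain ⟨lv, hlv⟩ := hch v (by simp)
      have hsub := pvSubR_unfold hlv
      have hlenv : (pvSubR parents (parents.length + 1) v).length =
          1 + ((pvCf parents v).map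
            (fun c => (pvSubR parents (parents.length + 1) c).length)).sum := by
        rw [hsub]
        simp [List.length_flatMap, List.map_reverse, List.sum_reverse]
        omega
      rw [ihf (st ++ (pvTreeA parents).getD v []) (acc ++ [v]) ?_ ?_]
      · rw [show (pvTreeA parents).getD v [] = pvCf parents v from rfl]
        simp only [List.reverse_append, List.reverse_singleton, List.flatMap_append,
          List.singleton_append, List.flatMap_cons, hsub]
        simp [List.append_assoc]
      · intro x hx
        rcases List.mem_append.mp hx with hx | hx
        · exact hch x (by simp [hx])
        · exact ⟨v :: lv, PvChain.step hlv hx⟩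
      · rw [show (pvTreeA parents).getD v [] = pvCf parents v from rfl]
        simp only [List.map_append, List.map_cons, List.map_nil, List.sum_append,
          List.sum_cons, List.sum_nil] at hfuel ⊢
        rw [hlenv] at hfuel
        omega

theorem pvSizes_getD {parents : List Int} :
    ∀ (f : Nat) {v : Int} {l : List Int} (d : PySem.Dict Int Int),
      PvChain parents (v :: l) → parents.length + 1 ≤ f + l.length →
      ∀ x : Int,
      ((pvSubR parents f v).reverse.foldl
          (fun d u => d.insert u (1 + (pvCf parents u).foldl (fun s c => s + d.getD c 0) 0))
          d).getD x 0 =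
        if x ∈ pvSubR parents f v then pvSzT parents x else d.getD x 0 := by
  intro f
  induction f with
  | zero =>
    intro v l d h hf
    have := pvChain_length h
    simp at this
    omega
  | succ f ih =>
    intro v l d h hf x
    have hrev : (pvSubR parents (f+1) v).reverse =
        (pvCf parents v).flatMap (fun c => (pvSubR parents f c).reverse) ++ [v] := by
      simp only [pvSubR]
      rw [List.reverse_cons, List.reverse_flatMap]
      simp [Function.comp_def]
    have hf1 : ∀ c ∈ pvCf parents v, 1 ≤ f := by
      intro c hc
      have := pvChain_length (PvChain.step h hc)
      simp at this
      omega
    have inner : ∀ (cs : List Int), (∀ c ∈ cs, c ∈ pvCf parents v) →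
        ∀ (d0 : PySem.Dict Int Int) (y : Int),
        ((cs.flatMap (fun c => (pvSubR parents f c).reverse)).foldl
          (fun d u => d.insert u (1 + (pvCf parents u).foldl (fun s c => s + d.getD c 0) 0))
          d0).getD y 0 =
        if y ∈ cs.flatMap (pvSubR parents f) then pvSzT parents y else d0.getD y 0 := by
      intro cs
      induction cs with
      | nil => intro _ d0 y; simp
      | cons c cs ihc =>
        intro hmem d0 y
        simp only [List.flatMap_cons, List.foldl_append]
        rw [ihc (fun a ha => hmem a (by simp [ha]))]
        by_cases hy1 : y ∈ cs.flatMap (pvSubR parents f)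
        · simp [hy1]
        · rw [if_neg hy1]
          rw [ih d0 (PvChain.step h (hmem c (by simp))) (by simp; omega) y]
          by_cases hy2 : y ∈ pvSubR parents f c
          · simp [hy1, hy2]
          · simp [hy1, hy2]
    rw [hrev, List.foldl_append]
    simp only [List.foldl_cons, List.foldl_nil]
    rw [PySem.Dict.getD_insert]
    have hval : 1 + (pvCf parents v).foldl (fun s c => s +
        (((pvCf parents v).flatMap (fun c => (pvSubR parents f c).reverse)).foldl
          (fun (d : PySem.Dict Int Int) u =>
            d.insert u (1 + (pvCf parents u).foldl (fun s c => s + d.getD c 0) 0))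
          d).getD c 0) 0 = pvSzT parents v := by
      rw [PySem.List.foldl_congr_mem _ _ (fun s c => s + pvSzT parents c) 0 (fun acc c hc => by
        rw [inner (pvCf parents v) (fun _ hc => hc) d c]
        have hcc : c ∈ (pvCf parents v).flatMap (pvSubR parents f) := by
          rw [List.mem_flatMap]
          refine ⟨c, hc, ?_⟩
          cases f with
          | zero => exact absurd (hf1 c hc) (by omega)
          | succ g => simp [pvSubR]
        rw [if_pos hcc])]
      rw [PySem.List.foldl_add]
      rw [pvSzT_unfold h]
      ring
    by_cases hx : x = v
    · subst hx
      rw [if_pos rfl, hval, if_pos (by simp [pvSubR])]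
    · rw [if_neg hx]
      rw [inner (pvCf parents v) (fun _ hc => hc) d x]
      have hiff : (x ∈ pvSubR parents (f+1) v) ↔
          (x ∈ (pvCf parents v).flatMap (pvSubR parents f)) := by
        simp [pvSubR, hx, List.mem_flatMap]
      by_cases hx2 : x ∈ (pvCf parents v).flatMap (pvSubR parents f)
      · rw [if_pos hx2, if_pos (hiff.mpr hx2)]
      · rw [if_neg hx2, if_neg (fun hm => hx2 (hiff.mp hm))]

theorem pvLe_foldl_max : ∀ (l : List Int) (a : Int), a ≤ l.foldl max a := by
  intro l
  induction l with
  | nil => intro a; simp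
  | cons b l ih => intro a; exact le_trans (le_max_left a b) (ih (max a b))

theorem pvMem_le_foldl_max : ∀ (l : List Int) (a : Int), ∀ y ∈ l, y ≤ l.foldl max a := by
  intro l
  induction l with
  | nil => intro a y hy; simp at hy
  | cons b l ih =>
    intro a y hy
    rcases List.mem_cons.mp hy with rfl | hy
    · exact le_trans (le_max_right a y) (pvLe_foldl_max l (max a y))
    · exact ih (max a b) y hy

theorem pvBest_fold (L : List Int) :
    L.foldl (fun bc s => if s > bc.1 then (s, (1:Int)) else if s = bc.1 then (bc.1, bc.2 + 1) else bc) ((0:Int), (0:Int)) =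
      (L.foldl max 0, (L.count (L.foldl max 0) : Int)) := by
  induction L using List.reverseRecOn with
  | nil => simp
  | append_singleton L x ih =>
    rw [List.foldl_append, List.foldl_append, ih]
    set M := L.foldl max 0 with hM
    have hM0 : (0:Int) ≤ M := pvLe_foldl_max L 0
    simp only [List.foldl_cons, List.foldl_nil]
    by_cases h1 : x > M
    · rw [if_pos h1]
      have hMx : max M x = x := max_eq_right (le_of_lt h1)
      rw [hMx]
      have hcnt : L.count x = 0 := List.count_eq_zero.mpr (fun hmem =>
        absurd (pvMem_le_foldl_max L 0 x hmem) (not_le.mpr h1))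
      simp [List.count_append, hcnt]
    · rw [if_neg h1]
      have hMx : max M x = M := max_eq_left (not_lt.mp h1)
      rw [hMx]
      by_cases h2 : x = M
      · rw [if_pos h2]
        subst h2
        simp [List.count_append]
      · rw [if_neg h2]
        simp only [List.count_append, List.count_singleton]
        simp
        exact h2

theorem pvChain_of_head {parents : List Int} {l : List Int} {x : Int}
    (h : PvChain parents l) (hh : l.head? = some x) : ∃ m, PvChain parents (x :: m) := by
  cases l with
  | nil => simp at hh
  | cons a t =>
    simp only [List.head?_cons, Option.some.injEq] at hh
    subst hh
    exact ⟨t, h⟩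

theorem pvA_eq (parents : List Int) :
    countHighestScoreNodes2 parents =
      ((pvSL parents (parents.length + 1) 0).count
        ((pvSL parents (parents.length + 1) 0).foldl max 0) : Int) := by
  simp only [countHighestScoreNodes2]
  rw [pvDfsA_eq (parents.length + 1) PySem.Dict.empty 0 PvChain.root (by simp)]
  rw [PySem.Dict.getD_foldl_modify_add_one, pvEmpty_getD]
  simp

theorem pvBodyEq {parents : List Int} (hn : 2 ≤ parents.length)
    (size : PySem.Dict Int Int)
    (hsz : ∀ x, size.getD x 0 =
      if x ∈ pvSubR parents (parents.length + 1) 0 then pvSzT parents x else 0)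
    {v : Int} (hv : v ∈ pvSubR parents (parents.length + 1) 0) :
    (if (parents.length : Int) - size.getD v 0 > 0
      then ((pvCf parents v).foldl (fun s c => s * size.getD c 0) 1) *
        ((parents.length : Int) - size.getD v 0)
      else (pvCf parents v).foldl (fun s c => s * size.getD c 0) 1) = pvScoreT parents v := by
  have hch0 : PvChain parents [0] := PvChain.root
  have hv' : v ∈ pvSub parents (parents.length + 1) 0 :=
    (pvSub_perm parents (parents.length + 1) 0).mem_iff.mp hv
  obtain ⟨q, hq, hh⟩ := pvSub_chain (parents.length + 1) hch0 hv'
  obtain ⟨mv, hchv⟩ := pvChain_of_head hq hh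
  have hsv : size.getD v 0 = pvSzT parents v := by rw [hsz v, if_pos hv]
  have hchild : ∀ c ∈ pvCf parents v, size.getD c 0 = pvSzT parents c := by
    intro c hc
    have hc0 : c ∈ pvSub parents (parents.length + 1) 0 :=
      pvSub_closed (parents.length + 1) hch0 (by simp) hv' hc
    rw [hsz c, if_pos ((pvSub_perm parents (parents.length + 1) 0).mem_iff.mpr hc0)]
  have hs0 : (pvCf parents v).foldl (fun s c => s * size.getD c 0) 1 =
      ((pvCf parents v).map (pvSzT parents)).foldl (fun a b => if b > 0 then a * b else a) 1 := by
    rw [PySem.List.foldl_congr_mem _ _ (fun s c => s * pvSzT parents c) 1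
      (fun acc c hc => by rw [hchild c hc])]
    rw [← List.foldl_map]
    exact (PySem.List.foldl_congr_mem _ (fun a b => if b > 0 then a * b else a)
      (fun a b => a * b) 1 (fun acc b hb => by
        obtain ⟨c, hc, rfl⟩ := List.mem_map.mp hb
        exact if_pos (by have := pvSzT_pos parents c; omega))).symm
  rw [hsv, hs0]
  unfold pvScoreT
  by_cases hleaf : pvCf parents v = []
  · rw [if_pos hleaf]
    have hsz1 : pvSzT parents v = 1 := by rw [pvSzT_unfold hchv]; simp [hleaf]
    rw [hsz1]
    have hpos : (parents.length : Int) - 1 > 0 := by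
      have h2 : (2:Int) ≤ (parents.length : Int) := by exact_mod_cast hn
      omega
    rw [if_pos hpos]
    simp [hleaf]
  · rw [if_neg hleaf]
    simp only []
    have hsum : ((pvCf parents v).map (pvSzT parents)).sum = pvSzT parents v - 1 := by
      rw [pvSzT_unfold hchv]; ring
    rw [hsum]
    have hc : (parents.length : Int) - (pvSzT parents v - 1) - 1 =
        (parents.length : Int) - pvSzT parents v := by ring
    rw [hc]

theorem pvAlt_eq {parents : List Int} (hn : 2 ≤ parents.length) :
    countHighestScoreNodes2_alt parents =
      ((((pvSubR parents (parents.length + 1) 0).map (pvScoreT parents)).foldl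
          (fun bc s => if s > bc.1 then (s, (1:Int)) else if s = bc.1 then (bc.1, bc.2 + 1) else bc)
          ((0:Int), (0:Int)))).2 := by
  have hch0 : PvChain parents [0] := PvChain.root
  have hnI : (0:Int) < (parents.length : Int) := by
    have h0 : 0 < parents.length := by omega
    exact_mod_cast h0
  have hcfrule : ∀ x : Int, (pvTreeA parents).getD x [] = pvCf parents x := fun _ => rfl
  simp only [countHighestScoreNodes2_alt, pvChildrenB_eq, hcfrule]
  rw [if_pos hnI]
  rw [pvStackB_eq (parents.length + 1) [0] [] (fun v hv => by
        simp only [List.mem_singleton] at hv; subst hv; exact ⟨[], hch0⟩)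
      (by
        simp only [List.map_cons, List.map_nil, List.sum_cons, List.sum_nil]
        have hp := (pvSub_perm parents (parents.length + 1) 0).length_eq
        have hb := pvSub_length_le hch0 (by omega) (parents.length + 1)
        omega)]
  simp only [List.reverse_cons, List.reverse_nil, List.nil_append, List.flatMap_cons,
    List.flatMap_nil, List.append_nil]
  have hsz : ∀ x : Int,
      (((pvSubR parents (parents.length + 1) 0).reverse).foldl
        (fun (d : PySem.Dict Int Int) v =>
          d.insert v (1 + (pvCf parents v).foldl (fun s c => s + d.getD c 0) 0))
        PySem.Dict.empty).getD x 0 =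
      if x ∈ pvSubR parents (parents.length + 1) 0 then pvSzT parents x else 0 := by
    intro x
    rw [pvSizes_getD (parents.length + 1) PySem.Dict.empty hch0 (by simp) x, pvEmpty_getD]
  rw [PySem.List.foldl_congr_mem _ _ (fun (bc : Int × Int) v =>
      if pvScoreT parents v > bc.1 then (pvScoreT parents v, (1:Int))
      else if pvScoreT parents v = bc.1 then (bc.1, bc.2 + 1) else bc) ((0:Int), (0:Int))
    (fun acc v hv => by rw [pvBodyEq hn _ hsz hv])]
  rw [List.foldl_map]

theorem pvMain {parents : List Int} (hn : 2 ≤ parents.length) :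
    countHighestScoreNodes2 parents = countHighestScoreNodes2_alt parents := by
  rw [pvA_eq, pvAlt_eq hn, pvBest_fold]
  have hpermA : (pvSL parents (parents.length + 1) 0).Perm
      ((pvSub parents (parents.length + 1) 0).map (pvScoreT parents)) :=
    pvSL_perm (parents.length + 1) PvChain.root (by simp)
  have hpermB : ((pvSubR parents (parents.length + 1) 0).map (pvScoreT parents)).Perm
      ((pvSub parents (parents.length + 1) 0).map (pvScoreT parents)) :=
    (pvSub_perm parents (parents.length + 1) 0).map _
  have hmaxA : (pvSL parents (parents.length + 1) 0).foldl max 0 =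
      ((pvSub parents (parents.length + 1) 0).map (pvScoreT parents)).foldl max 0 :=
    hpermA.foldl_eq 0
  have hmaxB : ((pvSubR parents (parents.length + 1) 0).map (pvScoreT parents)).foldl max 0 =
      ((pvSub parents (parents.length + 1) 0).map (pvScoreT parents)).foldl max 0 :=
    hpermB.foldl_eq 0
  simp only [hmaxA, hmaxB]
  rw [hpermA.count_eq, hpermB.count_eq]

-- ===== VERDICT (by name: the statement is the Claim_ definition above) =====
theorem countHighestScoreNodes2_spec : Claim_equal_countHighestScoreNodes2 := by
  intro parents _
  unfold Spec_countHighestScoreNodes2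
  cases parents with
  | nil => rfl
  | cons p rest =>
    cases rest with
    | nil => rfl
    | cons p2 rest2 => exact pvMain (by simp)
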